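-- pv_equiv track=rewrite | github.com/Trum-ok/BMSTU-labs | 1-semester/ЛР12/functional/pupupup.py | get_sentence_by_idx
-- ===== SOURCE A (Python) =====
-- def get_sentence_by_idx(lines: list[str], idx: int) -> str:
--     """Извлекает предложение с индексом `idx` из списка строк."""
--     current_idx = 0
--     sentence_parts = []
--
--     for line in lines:
--         words = line.split()
--         for word in words:
--             if current_idx == idx:
--                 sentence_parts.append(word)
--             if word.endswith((".", "?", "!", ";")):
--                 if current_idx == idx:
--                     return ' '.join(sentence_parts)
--                 sentence_parts = []
--                 current_idx += 1
--
--     return "\nИскомое предложение не найдено.\n"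
-- ===== SOURCE B (Python) =====
-- def get_sentence_by_idx(lines: list[str], idx: int) -> str:
--     """Извлекает предложение с индексом `idx` из списка строк."""
--     sentences = []
--     current = []
--     for line in lines:
--         for word in line.split():
--             current.append(word)
--             if word.endswith((".", "?", "!", ";")):
--                 sentences.append(' '.join(current))
--                 current = []
--     if 0 <= idx < len(sentences):
--         return sentences[idx]
--     return "\nИскомое предложение не найдено.\n"
-- ===== Notes on version B (the rewrite author's own statement) =====
-- stated objective: simpler
-- what changed: B replaces A's stateful scan with an index counter, conditional accumulation and an early return by a plain split-into-sentences pass followed by a single bounds-checked list lookup.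
import Mathlib
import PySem

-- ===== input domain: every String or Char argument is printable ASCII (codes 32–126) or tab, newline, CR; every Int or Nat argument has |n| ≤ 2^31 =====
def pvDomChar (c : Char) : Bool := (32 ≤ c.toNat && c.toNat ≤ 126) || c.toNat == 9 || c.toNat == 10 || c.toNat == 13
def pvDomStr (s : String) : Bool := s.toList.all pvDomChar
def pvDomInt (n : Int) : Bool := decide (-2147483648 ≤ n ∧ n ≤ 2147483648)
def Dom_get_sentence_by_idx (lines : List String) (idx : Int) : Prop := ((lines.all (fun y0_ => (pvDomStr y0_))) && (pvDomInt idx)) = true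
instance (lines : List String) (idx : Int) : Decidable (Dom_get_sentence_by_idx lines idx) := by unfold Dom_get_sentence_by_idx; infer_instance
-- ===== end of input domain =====

-- B replaces A's stateful scan (index counter, conditional accumulation, early return) by a
-- plain split-into-sentences pass followed by one bounds-checked lookup; objective: simpler.

-- word.endswith((".", "?", "!", ";")) — both Pythons contain this exact test
def pvTerm (w : String) : Bool :=
  PySem.Str.endswith w "." || PySem.Str.endswith w "?" ||
  PySem.Str.endswith w "!" || PySem.Str.endswith w ";"

def pvMsg : String := "\nИскомое предложение не найдено.\n"

-- ===== PORT A =====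
-- state: (early-return value, current_idx, sentence_parts)
def pvAStep (idx : Int) (st : Option String × Int × List String) (word : String) :
    Option String × Int × List String :=
  match st with
  | (some r, ci, parts) => (some r, ci, parts)   -- after `return`, nothing more happens
  | (none, ci, parts) =>
    let parts := if ci == idx then parts ++ [word] else parts
    if pvTerm word then
      if ci == idx then (some (PySem.Str.join " " parts), ci, parts)
      else (none, ci + 1, [])
    else (none, ci, parts)

def get_sentence_by_idx (lines : List String) (idx : Int) : String :=
  let fin := lines.foldl (fun st line => (PySem.Str.split₀ line).foldl (pvAStep idx) st)
    (none, 0, [])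
  match fin.1 with
  | some r => r
  | none => pvMsg

-- ===== PORT B =====
-- state: (finished sentences, current words)
def pvBStep (st : List String × List String) (word : String) : List String × List String :=
  let cur := st.2 ++ [word]
  if pvTerm word then (st.1 ++ [PySem.Str.join " " cur], []) else (st.1, cur)

def get_sentence_by_idx_alt (lines : List String) (idx : Int) : String :=
  let sentences := ((lines.flatMap PySem.Str.split₀).foldl pvBStep ([], [])).1
  if 0 ≤ idx ∧ idx < (sentences.length : Int) then
    (PySem.List.pyGet? sentences idx).getD pvMsg
  else pvMsg

-- ===== PRECONDITION & SPEC =====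
def Spec_get_sentence_by_idx (lines : List String) (idx : Int) (out : String) : Prop := out = get_sentence_by_idx_alt lines idx
instance (lines : List String) (idx : Int) (out : String) : Decidable (Spec_get_sentence_by_idx lines idx out) := by unfold Spec_get_sentence_by_idx; infer_instance

-- ===== CLAIM (what is proved, stated in full; the proofs are below) =====
def Claim_equal_get_sentence_by_idx : Prop := ∀ (lines : List String) (idx : Int), Dom_get_sentence_by_idx lines idx → Spec_get_sentence_by_idx lines idx (get_sentence_by_idx lines idx)

-- ===== LEMMAS AND PROOFS =====

-- folding line-by-line equals folding the flattened word list
theorem pvA_foldl_flatMap (idx : Int) (lines : List String)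
    (st : Option String × Int × List String) :
    lines.foldl (fun st line => (PySem.Str.split₀ line).foldl (pvAStep idx) st) st
      = (lines.flatMap PySem.Str.split₀).foldl (pvAStep idx) st := by
  induction lines generalizing st with
  | nil => rfl
  | cons l ls ih => simp [List.flatMap_cons, List.foldl_append, ih]

-- once A has returned, the result never changes
theorem pvA_fold_some (idx : Int) (ws : List String) (r : String) (ci : Int)
    (parts : List String) :
    (ws.foldl (pvAStep idx) (some r, ci, parts)).1 = some r := by
  induction ws generalizing ci parts with
  | nil => rfl
  | cons w ws ih => simpa [pvAStep] using ih ci parts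

-- B's accumulated sentences are a growing prefix
theorem pvB_fold_prefix (ws : List String) (s cur : List String) :
    (ws.foldl pvBStep (s, cur)).1 = s ++ (ws.foldl pvBStep ([], cur)).1 := by
  induction ws generalizing s cur with
  | nil => simp
  | cons w ws ih =>
    by_cases h : pvTerm w
    · simp only [List.foldl_cons, pvBStep, h, if_pos, List.nil_append]
      rw [ih (s ++ [PySem.Str.join " " (cur ++ [w])]) [],
        ih [PySem.Str.join " " (cur ++ [w])] []]
      simp
    · simp only [List.foldl_cons, pvBStep, h]
      exact ih s (cur ++ [w])

-- the main invariant: A's scan from a mid-state agrees with B's collect-then-index,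
-- provided idx does not point into the sentences already produced
theorem pv_main (idx : Int) (ws : List String) (sentences cur : List String)
    (hout : ¬ (0 ≤ idx ∧ idx < (sentences.length : Int))) :
    (match (ws.foldl (pvAStep idx)
        (none, (sentences.length : Int),
          if (sentences.length : Int) == idx then cur else [])).1 with
      | some r => r
      | none => pvMsg)
    = (let fs := (ws.foldl pvBStep (sentences, cur)).1
       if 0 ≤ idx ∧ idx < (fs.length : Int) then (PySem.List.pyGet? fs idx).getD pvMsg
       else pvMsg) := by
  induction ws generalizing sentences cur with
  | nil => simp [List.foldl_nil, if_neg hout]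
  | cons w ws ih =>
    by_cases ht : pvTerm w
    · by_cases he : (sentences.length : Int) = idx
      · -- the idx-th sentence finishes here: A returns, B records it
        have hA : pvAStep idx (none, (sentences.length : Int),
            if (sentences.length : Int) == idx then cur else []) w
            = (some (PySem.Str.join " " (cur ++ [w])), idx, cur ++ [w]) := by
          simp [pvAStep, he, ht]
        have h1 : (ws.foldl (pvAStep idx)
            (pvAStep idx (none, (sentences.length : Int),
              if (sentences.length : Int) == idx then cur else []) w)).1
            = some (PySem.Str.join " " (cur ++ [w])) := by
          rw [hA]; exact pvA_fold_some _ _ _ _ _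
        have h2 : (ws.foldl pvBStep (pvBStep (sentences, cur) w)).1
            = sentences ++ PySem.Str.join " " (cur ++ [w])
              :: (ws.foldl pvBStep ([], [])).1 := by
          simp only [pvBStep, ht, if_pos]
          rw [pvB_fold_prefix ws (sentences ++ [PySem.Str.join " " (cur ++ [w])]) []]
          simp
        simp only [List.foldl_cons, h1, h2]
        have hlen : idx < ((sentences ++ PySem.Str.join " " (cur ++ [w])
            :: (ws.foldl pvBStep ([], [])).1).length : Int) := by
          simp only [List.length_append, List.length_cons]
          omega
        have hge : 0 ≤ idx := by omega
        have hget : PySem.List.pyGet? (sentences ++ PySem.Str.join " " (cur ++ [w])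
            :: (ws.foldl pvBStep ([], [])).1) idx
            = some (PySem.Str.join " " (cur ++ [w])) := by
          have hidx : idx = (sentences.length : Int) := he.symm
          subst hidx
          rw [PySem.List.pyGet?_natCast]
          simp
        simp [hget, hge]
        intro hcontra
        exfalso
        omega
      · -- a sentence finishes but it is not the idx-th one
        have hA : pvAStep idx (none, (sentences.length : Int),
            if (sentences.length : Int) == idx then cur else []) w
            = (none, (sentences.length : Int) + 1, []) := by
          simp [pvAStep, ht, he]
        have hB : pvBStep (sentences, cur) w
            = (sentences ++ [PySem.Str.join " " (cur ++ [w])], []) := by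
          simp [pvBStep, ht]
        have hout' : ¬ (0 ≤ idx ∧ idx <
            (((sentences ++ [PySem.Str.join " " (cur ++ [w])]).length : Nat) : Int)) := by
          simp only [List.length_append, List.length_cons, List.length_nil]
          push_cast
          intro hc
          exact absurd (And.intro hc.1 (by omega)) (fun hh => hout (hh.imp id (fun h2 =>
            by omega)))
        have hnew := ih (sentences ++ [PySem.Str.join " " (cur ++ [w])]) [] hout'
        simp only [List.length_append, List.length_cons, List.length_nil, Nat.cast_add,
          Nat.cast_one, ite_self] at hnew ⊢
        simp only [List.foldl_cons, hA, hB]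
        convert hnew using 3
      -- no terminator: both just extend their current word list
    · have hA : pvAStep idx (none, (sentences.length : Int),
          if (sentences.length : Int) == idx then cur else []) w
          = (none, (sentences.length : Int),
             if (sentences.length : Int) == idx then cur ++ [w] else []) := by
        by_cases he : (sentences.length : Int) = idx <;> simp [pvAStep, ht, he]
      have hB : pvBStep (sentences, cur) w = (sentences, cur ++ [w]) := by
        simp [pvBStep, ht]
      simp only [List.foldl_cons, hA, hB]
      exact ih sentences (cur ++ [w]) hout

-- ===== VERDICT (by name: the statement is the Claim_ definition above) =====
theorem get_sentence_by_idx_spec : Claim_equal_get_sentence_by_idx := by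
  intro lines idx _
  show get_sentence_by_idx lines idx = get_sentence_by_idx_alt lines idx
  unfold get_sentence_by_idx get_sentence_by_idx_alt
  rw [pvA_foldl_flatMap]
  have := pv_main idx (lines.flatMap PySem.Str.split₀) [] [] (by simp)
  simpa using this
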